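-- pv_equiv track=rewrite | github.com/wrmsr/omlish | omdev/tests/test_findmagic.py | chop_magic_lines
-- ===== SOURCE A (Python) =====
-- import typing as ta
--
-- def chop_magic_lines(
--         magic_key: str,
--         prefix: str,
--         lines: ta.Iterable[str],
-- ) -> list[str] | None:
--     out: list[str] = []
--     for i, line in enumerate(lines):
--         if not i:
--             if not line.startswith(prefix + magic_key):
--                 return None
--             out.append(line[len(prefix) + len(magic_key) + 1:])
--         else:
--             if not line.startswith(prefix):
--                 return None
--             out.append(line[len(prefix):])
--     return out
-- ===== SOURCE B (Python) =====
-- def chop_magic_lines(magic_key, prefix, lines):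
--     lst = list(lines)
--     if not lst:
--         return []
--     if not lst[0].startswith(prefix + magic_key):
--         return None
--     if not all(line.startswith(prefix) for line in lst[1:]):
--         return None
--     return ([lst[0][len(prefix) + len(magic_key) + 1:]]
--             + [line[len(prefix):] for line in lst[1:]])
-- ===== Notes on version B (the rewrite author's own statement) =====
-- stated objective: alternative
-- what changed: B is staged: it first validates the whole input (magic-key check on the first line, an all() prefix check over the rest) and only then builds the output in one map/comprehension pass, where A interleaves checking and appending in a single enumerate loop with an index-zero branch.
import Mathlib
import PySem

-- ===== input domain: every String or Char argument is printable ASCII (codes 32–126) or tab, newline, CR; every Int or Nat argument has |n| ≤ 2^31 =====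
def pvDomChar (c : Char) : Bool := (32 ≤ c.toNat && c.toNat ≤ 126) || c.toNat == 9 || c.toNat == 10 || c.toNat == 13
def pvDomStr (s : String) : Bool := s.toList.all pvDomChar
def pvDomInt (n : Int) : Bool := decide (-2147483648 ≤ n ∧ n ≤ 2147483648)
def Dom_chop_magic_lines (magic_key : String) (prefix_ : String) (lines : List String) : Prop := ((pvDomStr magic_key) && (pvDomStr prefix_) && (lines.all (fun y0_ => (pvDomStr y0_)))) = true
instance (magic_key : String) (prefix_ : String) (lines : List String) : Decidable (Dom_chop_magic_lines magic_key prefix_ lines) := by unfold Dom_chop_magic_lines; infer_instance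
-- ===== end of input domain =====

-- B validates the whole list first (all() prefix check), then builds the output by a map; same value as A's single interleaved loop, no speed claim.

-- ===== PORT A =====
-- A's enumerate loop: i the running index, out the accumulator; early 'return None' = none
def chop_magic_lines_go (magic_key : String) (prefix_ : String) (i : Nat) (out : List String) : List String → Option (List String)
  | [] => some out
  | line :: rest =>
    if i = 0 then
      if !(PySem.Str.startswith line (prefix_ ++ magic_key)) then none
      else chop_magic_lines_go magic_key prefix_ (i + 1)
        (out ++ [PySem.Str.slice line (some ((PySem.Str.len prefix_) + (PySem.Str.len magic_key) + 1)) none]) rest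
    else
      if !(PySem.Str.startswith line prefix_) then none
      else chop_magic_lines_go magic_key prefix_ (i + 1)
        (out ++ [PySem.Str.slice line (some (PySem.Str.len prefix_)) none]) rest

def chop_magic_lines (magic_key : String) (prefix_ : String) (lines : List String) : Option (List String) :=
  chop_magic_lines_go magic_key prefix_ 0 [] lines

-- ===== PORT B =====
def chop_magic_lines_alt (magic_key : String) (prefix_ : String) (lines : List String) : Option (List String) :=
  match lines with
  | [] => some []
  | first :: rest =>
    if !(PySem.Str.startswith first (prefix_ ++ magic_key)) then none
    else if !(rest.all (fun line => PySem.Str.startswith line prefix_)) then none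
    else some ([PySem.Str.slice first (some ((PySem.Str.len prefix_) + (PySem.Str.len magic_key) + 1)) none]
               ++ rest.map (fun line => PySem.Str.slice line (some (PySem.Str.len prefix_)) none))

-- ===== PRECONDITION & SPEC =====
def Spec_chop_magic_lines (magic_key : String) (prefix_ : String) (lines : List String) (out : Option (List String)) : Prop := out = chop_magic_lines_alt magic_key prefix_ lines
instance (magic_key : String) (prefix_ : String) (lines : List String) (out : Option (List String)) : Decidable (Spec_chop_magic_lines magic_key prefix_ lines out) := by unfold Spec_chop_magic_lines; infer_instance

-- ===== CLAIM (what is proved, stated in full; the proofs are below) =====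
def Claim_equal_chop_magic_lines : Prop := ∀ (magic_key : String) (prefix_ : String) (lines : List String), Dom_chop_magic_lines magic_key prefix_ lines → Spec_chop_magic_lines magic_key prefix_ lines (chop_magic_lines magic_key prefix_ lines)

-- ===== LEMMAS AND PROOFS =====

-- A's loop at a positive index = check-then-map over the remaining lines
theorem chop_go_pos (magic_key prefix_ : String) (rest : List String) :
    ∀ (n : Nat) (out : List String),
      chop_magic_lines_go magic_key prefix_ (n + 1) out rest =
        (if rest.all (fun line => PySem.Str.startswith line prefix_) then
          some (out ++ rest.map (fun line => PySem.Str.slice line (some (PySem.Str.len prefix_)) none))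
         else none) := by
  induction rest with
  | nil => intro n out; simp [chop_magic_lines_go]
  | cons line tl ih =>
      intro n out
      simp only [chop_magic_lines_go, Nat.succ_ne_zero, reduceIte]
      rw [ih (n + 1)]
      cases h : PySem.Str.startswith line prefix_
      · simp only [h, Bool.not_false, reduceIte, List.all_cons, Bool.false_and, Bool.false_eq_true]
      · simp only [h, Bool.not_true, Bool.false_eq_true, reduceIte, List.all_cons, Bool.true_and,
          List.map_cons, List.append_assoc, List.singleton_append]

-- ===== VERDICT (by name: the statement is the Claim_ definition above) =====
theorem chop_magic_lines_spec : Claim_equal_chop_magic_lines := by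
  intro magic_key prefix_ lines _
  unfold Spec_chop_magic_lines chop_magic_lines chop_magic_lines_alt
  cases lines with
  | nil => rfl
  | cons first rest =>
      simp only [chop_magic_lines_go, reduceIte]
      cases h : PySem.Str.startswith first (prefix_ ++ magic_key)
      · simp only [Bool.not_false, reduceIte]
      · simp only [Bool.not_true, Bool.false_eq_true, reduceIte]
        rw [chop_go_pos magic_key prefix_ rest 0]
        cases h2 : rest.all (fun line => PySem.Str.startswith line prefix_)
        · simp only [Bool.not_false, Bool.false_eq_true, reduceIte]
        · simp only [Bool.not_true, Bool.false_eq_true, reduceIte, List.nil_append, List.singleton_append]
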